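-- pv_equiv track=rewrite | github.com/jbsam2/algo_problem | programmers/짝수행세기.py | solution
-- ===== SOURCE A (Python) =====
-- from math import comb
--
-- def solution(a):
--     n = len(a); m = len(a[0])
--     dp = [[0] * (n+1) for _ in range(m+1)]
--     dp[0][n] = 1
--     cols = [r.count(1) for r in zip(*a)]
--     combs = {}
--
--     for c in range(1, m+1):
--         for r in range(n+1):
--             for r2 in range(n+1):
--                 a1, b1 = n-r2, r2
--                 a2, b2 = cols[c-1], n-cols[c-1]
--                 x2 = (r + a2 - b1)
--                 if x2 % 2:continue
--                 x = x2 // 2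
--                 y = r - x
--                 if 0 <= x <= a2 and 0 <= y <= b2:
--                     if (a1, x) not in combs:
--                         combs[(a1, x)] = comb(a1, x)
--                     if (b1, y) not in combs:
--                         combs[(b1, y)] = comb(b1, y)
--                     dp[c][r] += (dp[c-1][r2] * combs[(a1, x)] * combs[(b1, y)])
--             dp[c][r] %= 10**7 + 19
--
--     return dp[m][n]
-- ===== SOURCE B (Python) =====
-- from math import comb
--
-- MOD = 10**7 + 19
--
--
-- def _trans(n, v):
--     # full (n+1)x(n+1) transition matrix for a column containing v ones
--     t = []
--     for r in range(n + 1):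
--         row = []
--         for r2 in range(n + 1):
--             d = r + v - r2
--             if d % 2 == 0 and 0 <= d // 2 <= v and 0 <= r - d // 2 <= n - v:
--                 row.append(comb(n - r2, d // 2) * comb(r2, r - d // 2) % MOD)
--             else:
--                 row.append(0)
--         t.append(row)
--     return t
--
--
-- def _matvec(M, w):
--     return [sum(row[j] * w[j] for j in range(len(w))) % MOD for row in M]
--
--
-- def _matmul(M, N):
--     L = len(N)
--     return [[sum(row[k] * N[k][j] for k in range(L)) % MOD for j in range(L)]
--             for row in M]
--
--
-- def _matpow(M, k):
--     # fast exponentiation; k >= 1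
--     if k < 2:
--         return M
--     h = _matpow(M, k // 2)
--     s = _matmul(h, h)
--     return s if k % 2 == 0 else _matmul(s, M)
--
--
-- def _rle(xs):
--     # run-length encoding of xs, one pass with a (current value, count) accumulator
--     if not xs:
--         return []
--     out = []
--     cur, cnt = xs[0], 1
--     for y in xs[1:]:
--         if y == cur:
--             cnt += 1
--         else:
--             out.append((cur, cnt))
--             cur, cnt = y, 1
--     out.append((cur, cnt))
--     return out
--
--
-- def solution(a):
--     n = len(a)
--     cols = [col.count(1) for col in zip(*a)]
--     dp = [0] * n + [1]
--     for v, k in _rle(cols):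
--         dp = _matvec(_matpow(_trans(n, v), k), dp)
--     return dp[n]
-- ===== Notes on version B (the rewrite author's own statement) =====
-- stated objective: alternative
-- what changed: B recasts the DP as linear algebra: it builds an (n+1)x(n+1) transition matrix per column value, run-length-encodes the column 1-counts, and applies each run of k equal columns at once via fast matrix exponentiation (matrix-matrix products mod p), instead of A's per-column sweep over all previous states with a memoized comb dict.
import Mathlib
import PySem

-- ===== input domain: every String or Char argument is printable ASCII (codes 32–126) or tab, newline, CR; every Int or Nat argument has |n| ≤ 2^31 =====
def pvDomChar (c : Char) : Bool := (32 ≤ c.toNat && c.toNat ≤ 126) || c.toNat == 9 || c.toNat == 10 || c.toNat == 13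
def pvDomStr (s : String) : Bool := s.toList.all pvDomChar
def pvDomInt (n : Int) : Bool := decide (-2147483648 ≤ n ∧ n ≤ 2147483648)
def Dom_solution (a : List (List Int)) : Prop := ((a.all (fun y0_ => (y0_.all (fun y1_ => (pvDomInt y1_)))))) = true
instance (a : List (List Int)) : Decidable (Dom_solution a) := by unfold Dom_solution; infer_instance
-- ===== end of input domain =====

-- B replaces A's per-column DP sweep (inner gather over all previous states, with a memo
-- dict of binomials) by a matrix formulation: it builds one (n+1)x(n+1) transition matrix
-- per column value, run-length-encodes the column counts and applies each run at once by
-- fast matrix exponentiation; objective: alternative algorithm, not claimed faster.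

-- ===== PORT A =====
def pvMod : Int := 10 ^ 7 + 19

-- math.comb(p, q); exact for the nonnegative arguments both ports pass it
def pyComb (p q : Int) : Int := (p.toNat.choose q.toNat : Int)

-- cols = [r.count(1) for r in zip(*a)]; under Pre_solution every row has length ≥
-- len(a[0]), so zip truncates at len(a[0]) and getD never hits its default.
def pyCols (a : List (List Int)) : List Int :=
  (List.range a.headI.length).map (fun j => ((a.map (fun row => row.getD j 0)).count 1 : Int))

-- 'if (k1,k2) not in combs: combs[(k1,k2)] = comb(k1,k2)' — A's memo idiom
def memoAdd (d : PySem.Dict (Int × Int) Int) (p q : Int) : PySem.Dict (Int × Int) Int :=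
  if d.contains (p, q) then d else d.insert (p, q) (pyComb p q)

-- body of A's innermost r2-loop, threading (accumulator, combs memo dict)
def solInner (dpPrev : List Int) (n v r : Int)
    (st : Int × PySem.Dict (Int × Int) Int) (r2 : Int) :
    Int × PySem.Dict (Int × Int) Int :=
  let a1 := n - r2
  let b1 := r2
  let a2 := v
  let b2 := n - v
  let x2 := r + a2 - b1
  if PySem.Int.mod x2 2 ≠ 0 then st
  else
    let x := PySem.Int.floordiv x2 2
    let y := r - x
    if 0 ≤ x ∧ x ≤ a2 ∧ 0 ≤ y ∧ y ≤ b2 then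
      let c1 := memoAdd st.2 a1 x
      let c2 := memoAdd c1 b1 y
      (st.1 + dpPrev.getD r2.toNat 0 * c2.getD (a1, x) 0 * c2.getD (b1, y) 0, c2)
    else st

-- one column c of A: builds dp[c] row by row (with the final %=), threading combs
def solCol (n : Int) (st : List Int × PySem.Dict (Int × Int) Int) (v : Int) :
    List Int × PySem.Dict (Int × Int) Int :=
  (PySem.List.pyRange 0 (n + 1) 1).foldl
    (fun acc r =>
      let p := (PySem.List.pyRange 0 (n + 1) 1).foldl (solInner st.1 n v r) (0, acc.2)
      (acc.1 ++ [PySem.Int.mod p.1 pvMod], p.2))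
    ([], st.2)

def solution (a : List (List Int)) : Int :=
  let n := a.length
  let dp0 : List Int := List.replicate n 0 ++ [1]
  let st := (pyCols a).foldl (solCol (n : Int)) (dp0, PySem.Dict.empty)
  st.1.getD n 0

-- ===== PORT B =====
-- min over the row lengths (the number of tuples zip(*a) yields); 0 for a = []
def minLen (a : List (List Int)) : Nat :=
  (a.map List.length).foldr min a.headI.length

-- cols = [col.count(1) for col in zip(*a)] — zip stops at the shortest row, so the
-- indices j < minLen a are in range of every row and getD never hits its default
def pyColsB (a : List (List Int)) : List Int :=
  (List.range (minLen a)).map (fun j => ((a.map (fun row => row.getD j 0)).count 1 : Int))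

-- _trans(n, v): the (n+1)x(n+1) transition matrix of one column holding v ones
def matT (n v : Int) : List (List Int) :=
  (PySem.List.pyRange 0 (n + 1) 1).map (fun r =>
    (PySem.List.pyRange 0 (n + 1) 1).map (fun r2 =>
      if PySem.Int.mod (r + v - r2) 2 = 0 ∧
          0 ≤ PySem.Int.floordiv (r + v - r2) 2 ∧ PySem.Int.floordiv (r + v - r2) 2 ≤ v ∧
          0 ≤ r - PySem.Int.floordiv (r + v - r2) 2 ∧ r - PySem.Int.floordiv (r + v - r2) 2 ≤ n - v
      then PySem.Int.mod
            (pyComb (n - r2) (PySem.Int.floordiv (r + v - r2) 2)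
              * pyComb r2 (r - PySem.Int.floordiv (r + v - r2) 2)) pvMod
      else 0))

-- _matvec(M, w); indices stay in range in every call B makes, so pyGetD is exact
def matVec (M : List (List Int)) (w : List Int) : List Int :=
  M.map (fun row =>
    PySem.Int.mod
      ((PySem.List.pyRange 0 (w.length : Int) 1).foldl
        (fun s j => s + PySem.List.pyGetD row j 0 * PySem.List.pyGetD w j 0) 0) pvMod)

-- _matmul(M, N)
def matMul (M N : List (List Int)) : List (List Int) :=
  M.map (fun row =>
    (PySem.List.pyRange 0 (N.length : Int) 1).map (fun j =>
      PySem.Int.mod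
        ((PySem.List.pyRange 0 (N.length : Int) 1).foldl
          (fun s k => s + PySem.List.pyGetD row k 0
              * PySem.List.pyGetD (PySem.List.pyGetD N k []) j 0) 0) pvMod))

-- _matpow(M, k) by binary exponentiation (k ≥ 1 in every call B makes); the structural
-- fuel argument (initially k, enough for the halving recursion) only makes the same
-- computation total — it never changes a value
def matPowGo : Nat → List (List Int) → Nat → List (List Int)
  | 0, M, _ => M
  | fuel + 1, M, k =>
    if k < 2 then M
    else
      let h := matPowGo fuel M (k / 2)
      let s := matMul h h
      if k % 2 == 0 then s else matMul s M

def matPow (M : List (List Int)) (k : Nat) : List (List Int) := matPowGo k M k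

-- _rle(xs): run-length encoding, one pass with the (current value, count) accumulator
def rleAux (x : Int) (c : Nat) : List Int → List (Int × Nat)
  | [] => [(x, c)]
  | y :: ys => if y == x then rleAux x (c + 1) ys else (x, c) :: rleAux y 1 ys

def rle : List Int → List (Int × Nat)
  | [] => []
  | x :: xs => rleAux x 1 xs

def solution_alt (a : List (List Int)) : Int :=
  let n : Int := a.length
  let dpF := (rle (pyColsB a)).foldl
    (fun dp vk => matVec (matPow (matT n vk.1) vk.2) dp)
    (List.replicate a.length 0 ++ [1])
  dpF.getD a.length 0

-- ===== PRECONDITION & SPEC =====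
-- Pre_ excludes exactly the inputs where A raises IndexError: the empty list (a[0]) and
-- inputs with some row shorter than the first (cols[c-1] out of range after zip truncation).
def Pre_solution (a : List (List Int)) : Prop :=
  a ≠ [] ∧ ∀ r ∈ a, a.headI.length ≤ r.length
instance (a : List (List Int)) : Decidable (Pre_solution a) := by unfold Pre_solution; infer_instance

def pvWitness_solution : List (List Int) := [[1, 0], [0, 1]]

def Spec_solution (a : List (List Int)) (out : Int) : Prop := out = solution_alt a
instance (a : List (List Int)) (out : Int) : Decidable (Spec_solution a out) := by unfold Spec_solution; infer_instance

-- ===== CLAIM (what is proved, stated in full; the proofs are below) =====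
def Claim_equal_solution : Prop := ∀ (a : List (List Int)), Dom_solution a → Pre_solution a → Spec_solution a (solution a)

-- ===== LEMMAS AND PROOFS =====

-- the value A's inner r2-iteration adds to dp[c][r]
def termA (dp : List Int) (n v r r2 : Int) : Int :=
  if PySem.Int.mod (r + v - r2) 2 = 0 ∧
      0 ≤ PySem.Int.floordiv (r + v - r2) 2 ∧ PySem.Int.floordiv (r + v - r2) 2 ≤ v ∧
      0 ≤ r - PySem.Int.floordiv (r + v - r2) 2 ∧ r - PySem.Int.floordiv (r + v - r2) 2 ≤ n - v then
    dp.getD r2.toNat 0 * pyComb (n - r2) (PySem.Int.floordiv (r + v - r2) 2)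
      * pyComb r2 (r - PySem.Int.floordiv (r + v - r2) 2)
  else 0

-- A's column update, written as the map it produces
def stepA (n v : Int) (dp : List Int) : List Int :=
  (PySem.List.pyRange 0 (n + 1) 1).map (fun r =>
    PySem.Int.mod (((PySem.List.pyRange 0 (n + 1) 1).map (termA dp n v r)).sum) pvMod)

-- invariant of A's memo dict: every stored value is the comb of its key
def CombsInv (d : PySem.Dict (Int × Int) Int) : Prop :=
  ∀ p q, d.contains (p, q) = true → d.getD (p, q) 0 = pyComb p q

theorem combsInv_empty : CombsInv PySem.Dict.empty := by
  intro p q h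
  simp [PySem.Dict.contains, PySem.Dict.empty] at h

theorem memoAdd_spec (d : PySem.Dict (Int × Int) Int) (h : CombsInv d) (p q : Int) :
    CombsInv (memoAdd d p q) ∧ (memoAdd d p q).contains (p, q) = true ∧
    (∀ k, d.contains k = true → (memoAdd d p q).contains k = true) := by
  unfold memoAdd
  split_ifs with hc
  · exact ⟨h, hc, fun k hk => hk⟩
  · refine ⟨?_, ?_, ?_⟩
    · intro p' q' h'
      by_cases he : (p', q') = (p, q)
      · rw [he, PySem.Dict.getD_insert_self]
        rw [Prod.mk.injEq] at he
        rw [he.1, he.2]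
      · rw [PySem.Dict.getD_insert_of_ne _ _ _ he]
        apply h
        rw [PySem.Dict.contains_insert] at h'
        simpa [he] using h'
    · exact PySem.Dict.contains_insert_self _ _ _
    · intro k hk
      rw [PySem.Dict.contains_insert _ _ _ _, hk]
      simp

theorem solInner_spec (dpPrev : List Int) (n v r : Int) (acc : Int)
    (d : PySem.Dict (Int × Int) Int) (h : CombsInv d) (r2 : Int) :
    (solInner dpPrev n v r (acc, d) r2).1 = acc + termA dpPrev n v r r2 ∧
    CombsInv (solInner dpPrev n v r (acc, d) r2).2 := by
  obtain ⟨inv1, mem1, mono1⟩ := memoAdd_spec d h (n - r2) (PySem.Int.floordiv (r + v - r2) 2)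
  obtain ⟨inv2, mem2, mono2⟩ :=
    memoAdd_spec (memoAdd d (n - r2) (PySem.Int.floordiv (r + v - r2) 2)) inv1 r2
      (r - PySem.Int.floordiv (r + v - r2) 2)
  have e1 := inv2 (n - r2) (PySem.Int.floordiv (r + v - r2) 2) (mono2 _ mem1)
  have e2 := inv2 r2 (r - PySem.Int.floordiv (r + v - r2) 2) mem2
  by_cases h1 : PySem.Int.mod (r + v - r2) 2 = 0
  · by_cases h2 : 0 ≤ PySem.Int.floordiv (r + v - r2) 2 ∧ PySem.Int.floordiv (r + v - r2) 2 ≤ v ∧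
        0 ≤ r - PySem.Int.floordiv (r + v - r2) 2 ∧ r - PySem.Int.floordiv (r + v - r2) 2 ≤ n - v
    · constructor
      · simp only [solInner, termA]
        rw [if_neg (not_not_intro h1), if_pos h2, if_pos ⟨h1, h2⟩]
        simp only []
        rw [e1, e2]
      · simp only [solInner]
        rw [if_neg (not_not_intro h1), if_pos h2]
        exact inv2
    · constructor
      · simp only [solInner, termA]
        rw [if_neg (not_not_intro h1), if_neg h2, if_neg (fun hc => h2 hc.2)]
        simp
      · simp only [solInner]
        rw [if_neg (not_not_intro h1), if_neg h2]
        exact h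
  · constructor
    · simp only [solInner, termA]
      rw [if_pos h1, if_neg (fun hc => h1 hc.1)]
      simp
    · simp only [solInner]
      rw [if_pos h1]
      exact h

theorem inner_fold_spec (dpPrev : List Int) (n v r : Int) (l : List Int) :
    ∀ (acc : Int) (d : PySem.Dict (Int × Int) Int), CombsInv d →
    (l.foldl (solInner dpPrev n v r) (acc, d)).1 = acc + (l.map (termA dpPrev n v r)).sum ∧
    CombsInv (l.foldl (solInner dpPrev n v r) (acc, d)).2 := by
  induction l with
  | nil =>
    intro acc d h
    exact ⟨by simp, h⟩
  | cons r2 t ih =>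
    intro acc d h
    obtain ⟨h1, h2⟩ := solInner_spec dpPrev n v r acc d h r2
    simp only [List.foldl_cons, List.map_cons, List.sum_cons]
    have hpair : solInner dpPrev n v r (acc, d) r2
        = ((solInner dpPrev n v r (acc, d) r2).1, (solInner dpPrev n v r (acc, d) r2).2) := rfl
    rw [hpair, h1]
    obtain ⟨ih1, ih2⟩ := ih (acc + termA dpPrev n v r r2) _ h2
    rw [ih1]
    exact ⟨by ring, ih2⟩

-- A's r-loop body, named so the fold steps stay readable in proofs
def rowStep (dpPrev : List Int) (n v : Int) (acc : List Int × PySem.Dict (Int × Int) Int)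
    (r : Int) : List Int × PySem.Dict (Int × Int) Int :=
  let p := (PySem.List.pyRange 0 (n + 1) 1).foldl (solInner dpPrev n v r) (0, acc.2)
  (acc.1 ++ [PySem.Int.mod p.1 pvMod], p.2)

theorem solCol_eq_rowStep (n : Int) (dp : List Int) (d : PySem.Dict (Int × Int) Int) (v : Int) :
    solCol n (dp, d) v = (PySem.List.pyRange 0 (n + 1) 1).foldl (rowStep dp n v) ([], d) := rfl

theorem rowStep_apply (dpPrev : List Int) (n v : Int) (rows : List Int)
    (d : PySem.Dict (Int × Int) Int) (r : Int) :
    rowStep dpPrev n v (rows, d) r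
      = (rows ++ [PySem.Int.mod ((PySem.List.pyRange 0 (n + 1) 1).foldl (solInner dpPrev n v r) (0, d)).1 pvMod],
         ((PySem.List.pyRange 0 (n + 1) 1).foldl (solInner dpPrev n v r) (0, d)).2) := rfl

theorem row_fold_spec (dpPrev : List Int) (n v : Int) (l : List Int) :
    ∀ (rows : List Int) (d : PySem.Dict (Int × Int) Int), CombsInv d →
    (l.foldl (rowStep dpPrev n v) (rows, d)).1
      = rows ++ l.map (fun r =>
          PySem.Int.mod (((PySem.List.pyRange 0 (n + 1) 1).map (termA dpPrev n v r)).sum) pvMod) ∧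
    CombsInv (l.foldl (rowStep dpPrev n v) (rows, d)).2 := by
  induction l with
  | nil =>
    intro rows d h
    exact ⟨by simp, h⟩
  | cons r t ih =>
    intro rows d h
    obtain ⟨h1, h2⟩ := inner_fold_spec dpPrev n v r (PySem.List.pyRange 0 (n + 1) 1) 0 d h
    simp only [List.foldl_cons, List.map_cons]
    rw [rowStep_apply, h1]
    obtain ⟨ih1, ih2⟩ := ih _ _ h2
    rw [ih1]
    exact ⟨by simp, ih2⟩

theorem col_eq_stepA (dp : List Int) (d : PySem.Dict (Int × Int) Int) (n v : Int)
    (h : CombsInv d) :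
    (solCol n (dp, d) v).1 = stepA n v dp ∧ CombsInv (solCol n (dp, d) v).2 := by
  rw [solCol_eq_rowStep]
  obtain ⟨h1, h2⟩ := row_fold_spec dp n v (PySem.List.pyRange 0 (n + 1) 1) [] d h
  exact ⟨by rw [h1, List.nil_append]; rfl, h2⟩

theorem fold_eq_stepA (n : Int) (cs : List Int) :
    ∀ (dp : List Int) (d : PySem.Dict (Int × Int) Int), CombsInv d →
    (cs.foldl (solCol n) (dp, d)).1 = cs.foldl (fun dp v => stepA n v dp) dp := by
  induction cs with
  | nil => intro dp d _; rfl
  | cons v t ih =>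
    intro dp d hd
    simp only [List.foldl_cons]
    obtain ⟨c1, c2⟩ := col_eq_stepA dp d n v hd
    have hpair : solCol n (dp, d) v = ((solCol n (dp, d) v).1, (solCol n (dp, d) v).2) := rfl
    rw [hpair, c1]
    exact ih _ _ c2

-- ---------- B side ----------

theorem sum_pyRange_eq (S : Nat) (f : Int → Int) :
    ((PySem.List.pyRange 0 (S : Int) 1).map f).sum = ∑ k ∈ Finset.range S, f (k : Int) := by
  rw [PySem.List.pyRange_one, List.map_map]
  have h1 : ((S : Int) - 0).toNat = S := by omega
  have h2 : (f ∘ fun k : Nat => (0 : Int) + (k : Int)) = fun k : Nat => f (k : Int) := by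
    funext k; simp
  rw [h1, h2]
  rfl

theorem mod_eq (a : Int) : PySem.Int.mod a pvMod = a % pvMod :=
  PySem.Int.mod_eq_emod_of_pos (by norm_num [pvMod])

theorem sum_emod_congr (S : Nat) (f g : Nat → Int)
    (h : ∀ k : Nat, k < S → f k % pvMod = g k % pvMod) :
    (∑ k ∈ Finset.range S, f k) % pvMod = (∑ k ∈ Finset.range S, g k) % pvMod := by
  induction S with
  | zero => rfl
  | succ S ih =>
    rw [Finset.sum_range_succ, Finset.sum_range_succ, Int.add_emod,
        ih (fun k hk => h k (by omega)), h S (by omega), ← Int.add_emod]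

theorem emod_mul_left (x y : Int) : (x % pvMod) * y % pvMod = x * y % pvMod := by
  rw [Int.mul_emod, Int.emod_emod_of_dvd x dvd_rfl, ← Int.mul_emod]

theorem emod_mul_right (x y : Int) : x * (y % pvMod) % pvMod = x * y % pvMod := by
  rw [Int.mul_emod, Int.emod_emod_of_dvd y dvd_rfl, ← Int.mul_emod]

theorem matVec_length (M : List (List Int)) (w : List Int) : (matVec M w).length = M.length := by
  simp [matVec]

theorem matMul_length (M N : List (List Int)) : (matMul M N).length = M.length := by
  simp [matMul]

theorem matPowGo_length (fuel : Nat) : ∀ (M : List (List Int)) (k : Nat),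
    (matPowGo fuel M k).length = M.length := by
  induction fuel with
  | zero => intro M k; rfl
  | succ fuel ih =>
    intro M k
    rw [matPowGo]
    split
    · rfl
    · split
      · rw [matMul_length, ih M (k / 2)]
      · rw [matMul_length, matMul_length, ih M (k / 2)]

theorem matT_length (n v : Int) : (matT n v).length = (n + 1).toNat := by
  simp [matT, PySem.List.length_pyRange_one]

theorem stepA_length (n v : Int) (dp : List Int) : (stepA n v dp).length = (n + 1).toNat := by
  simp [stepA, PySem.List.length_pyRange_one]

-- L1: B's matrix-vector product with the transition matrix is A's column update
theorem matVec_matT (nn : Nat) (v : Int) (dp : List Int) (hdp : dp.length = nn + 1) :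
    matVec (matT (nn : Int) v) dp = stepA (nn : Int) v dp := by
  unfold matVec matT stepA
  rw [List.map_map]
  apply List.map_congr_left
  intro r hr
  rw [PySem.List.mem_pyRange_one] at hr
  have hlen : (dp.length : Int) = (nn : Int) + 1 := by rw [hdp]; push_cast; ring
  have hc : (nn : Int) + 1 = ((nn + 1 : Nat) : Int) := by push_cast; ring
  simp only [Function.comp]
  rw [PySem.List.foldl_add
        (g := fun j => PySem.List.pyGetD
            ((PySem.List.pyRange 0 ((nn : Int) + 1) 1).map (fun r2 =>
              if PySem.Int.mod (r + v - r2) 2 = 0 ∧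
                  0 ≤ PySem.Int.floordiv (r + v - r2) 2 ∧ PySem.Int.floordiv (r + v - r2) 2 ≤ v ∧
                  0 ≤ r - PySem.Int.floordiv (r + v - r2) 2 ∧ r - PySem.Int.floordiv (r + v - r2) 2 ≤ (nn : Int) - v
              then PySem.Int.mod
                    (pyComb ((nn : Int) - r2) (PySem.Int.floordiv (r + v - r2) 2)
                      * pyComb r2 (r - PySem.Int.floordiv (r + v - r2) 2)) pvMod
              else 0)) j 0 * PySem.List.pyGetD dp j 0)]
  rw [zero_add, hlen, hc, sum_pyRange_eq, sum_pyRange_eq, mod_eq, mod_eq]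
  apply sum_emod_congr
  intro k hk
  have hk0 : (0 : Int) ≤ (k : Int) := by positivity
  have hk1 : (k : Int) < ((nn + 1 : Nat) : Int) := by exact_mod_cast hk
  rw [PySem.List.pyGetD_map_pyRange_of_nonneg _ _ _ _ hk0 hk1,
      PySem.List.pyGetD_of_nonneg dp 0 hk0]
  unfold termA
  split
  · rw [mod_eq, emod_mul_left]
    congr 1
    ring
  · simp

-- L2: a matrix-vector product with a product matrix is two successive products
theorem matVec_matMul (M N : List (List Int)) (dp : List Int) (h : N.length = dp.length) :
    matVec (matMul M N) dp = matVec M (matVec N dp) := by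
  have hw : (matVec N dp).length = N.length := matVec_length N dp
  unfold matMul
  conv_lhs => rw [matVec]
  conv_rhs => rw [matVec]
  rw [List.map_map]
  apply List.map_congr_left
  intro row _
  simp only [Function.comp]
  rw [hw, h]
  rw [PySem.List.foldl_add (g := fun j => PySem.List.pyGetD
        ((PySem.List.pyRange 0 (dp.length : Int) 1).map (fun j =>
          PySem.Int.mod
            ((PySem.List.pyRange 0 (dp.length : Int) 1).foldl
              (fun s k => s + PySem.List.pyGetD row k 0
                  * PySem.List.pyGetD (PySem.List.pyGetD N k []) j 0) 0) pvMod)) j 0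
        * PySem.List.pyGetD dp j 0),
      PySem.List.foldl_add (g := fun j => PySem.List.pyGetD row j 0
        * PySem.List.pyGetD (matVec N dp) j 0),
      zero_add, zero_add, mod_eq, mod_eq, sum_pyRange_eq, sum_pyRange_eq]
  have L : (∑ j ∈ Finset.range dp.length, PySem.List.pyGetD
        ((PySem.List.pyRange 0 (dp.length : Int) 1).map (fun j =>
          PySem.Int.mod
            ((PySem.List.pyRange 0 (dp.length : Int) 1).foldl
              (fun s k => s + PySem.List.pyGetD row k 0
                  * PySem.List.pyGetD (PySem.List.pyGetD N k []) j 0) 0) pvMod)) (j : Int) 0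
        * PySem.List.pyGetD dp (j : Int) 0) % pvMod
      = (∑ j ∈ Finset.range dp.length,
          (∑ k ∈ Finset.range dp.length, row.getD k 0 * (N.getD k []).getD j 0) * dp.getD j 0) % pvMod := by
    apply sum_emod_congr
    intro j hj
    have hj0 : (0 : Int) ≤ (j : Int) := by positivity
    have hjN : (j : Int) < (dp.length : Int) := by exact_mod_cast hj
    rw [PySem.List.pyGetD_map_pyRange_of_nonneg _ _ _ _ hj0 hjN,
        PySem.List.pyGetD_of_nonneg dp 0 hj0, Int.toNat_natCast]
    rw [mod_eq,
        PySem.List.foldl_add (g := fun k => PySem.List.pyGetD row k 0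
          * PySem.List.pyGetD (PySem.List.pyGetD N k []) (j : Int) 0),
        zero_add, sum_pyRange_eq, emod_mul_left]
    congr 2
    apply Finset.sum_congr rfl
    intro k hk
    have hk0 : (0 : Int) ≤ (k : Int) := by positivity
    rw [PySem.List.pyGetD_of_nonneg row 0 hk0, PySem.List.pyGetD_of_nonneg N [] hk0,
        PySem.List.pyGetD_of_nonneg _ 0 hj0, Int.toNat_natCast, Int.toNat_natCast]
  have R : (∑ j ∈ Finset.range dp.length, PySem.List.pyGetD row (j : Int) 0
        * PySem.List.pyGetD (matVec N dp) (j : Int) 0) % pvMod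
      = (∑ j ∈ Finset.range dp.length,
          row.getD j 0 * (∑ k ∈ Finset.range dp.length, (N.getD j []).getD k 0 * dp.getD k 0)) % pvMod := by
    apply sum_emod_congr
    intro j hj
    have hj0 : (0 : Int) ≤ (j : Int) := by positivity
    have hjw : j < (matVec N dp).length := by rw [hw, h]; exact hj
    rw [PySem.List.pyGetD_of_nonneg row 0 hj0,
        PySem.List.pyGetD_of_nonneg (matVec N dp) 0 hj0, Int.toNat_natCast]
    rw [List.getD_eq_getElem _ _ hjw]
    unfold matVec
    rw [List.getElem_map]
    rw [mod_eq,
        PySem.List.foldl_add (g := fun k => PySem.List.pyGetD N[j] k 0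
          * PySem.List.pyGetD dp k 0),
        zero_add, sum_pyRange_eq, emod_mul_right]
    congr 2
    · apply Finset.sum_congr rfl
      intro k hk
      have hk0 : (0 : Int) ≤ (k : Int) := by positivity
      have hjN : j < N.length := h ▸ hj
      rw [PySem.List.pyGetD_of_nonneg _ 0 hk0, PySem.List.pyGetD_of_nonneg dp 0 hk0]
      simp only [Int.toNat_natCast]
      rw [List.getD_eq_getElem N [] hjN]
  rw [L, R]
  congr 1
  simp_rw [Finset.sum_mul, Finset.mul_sum, mul_assoc]
  exact Finset.sum_comm

theorem iter_matVec_length (M : List (List Int)) (k : Nat) :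
    ∀ dp : List Int, dp.length = M.length → ((fun w => matVec M w)^[k] dp).length = M.length := by
  induction k with
  | zero => intro dp hdp; exact hdp
  | succ k ih =>
    intro dp hdp
    rw [Function.iterate_succ_apply]
    exact ih (matVec M dp) (matVec_length M dp)

-- L4: applying M^k is applying M k times
theorem matPowGo_matVec (M : List (List Int)) (fuel : Nat) : ∀ (k : Nat), 1 ≤ k → k ≤ fuel →
    ∀ dp : List Int, dp.length = M.length →
    matVec (matPowGo fuel M k) dp = (fun w => matVec M w)^[k] dp := by
  induction fuel with
  | zero => intro k hk hf; omega
  | succ fuel ih =>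
    intro k hk hf dp hdp
    rw [matPowGo]
    split
    · have hk1 : k = 1 := by omega
      subst hk1
      simp
    · rename_i hk2
      have hlen : (matPowGo fuel M (k / 2)).length = M.length := matPowGo_length fuel M (k / 2)
      have ih2 := ih (k / 2) (by omega) (by omega)
      split
      · rename_i hev
        rw [matVec_matMul _ _ _ (hlen.trans hdp.symm), ih2 dp hdp,
            ih2 _ (iter_matVec_length M (k / 2) dp hdp), ← Function.iterate_add_apply]
        congr 1
        simp only [beq_iff_eq] at hev
        omega
      · rename_i hodd
        rw [matVec_matMul _ _ _ hdp.symm,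
            matVec_matMul _ _ _ (hlen.trans (matVec_length M dp).symm),
            ih2 (matVec M dp) (matVec_length M dp),
            ih2 _ (iter_matVec_length M (k / 2) _ (matVec_length M dp))]
        have hstep : matVec M dp = (fun w => matVec M w)^[1] dp := by
          simp
        rw [hstep, ← Function.iterate_add_apply, ← Function.iterate_add_apply]
        congr 1
        simp only [beq_iff_eq] at hodd
        omega

theorem matPow_matVec (M : List (List Int)) (k : Nat) (hk : 1 ≤ k) :
    ∀ dp : List Int, dp.length = M.length →
    matVec (matPow M k) dp = (fun w => matVec M w)^[k] dp :=
  matPowGo_matVec M k k hk le_rfl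

-- L5: the two one-step functions agree along iterates (length is preserved)
theorem iter_eq (nn : Nat) (v : Int) (k : Nat) :
    ∀ dp : List Int, dp.length = nn + 1 →
    (fun w => matVec (matT (nn : Int) v) w)^[k] dp = (fun w => stepA (nn : Int) v w)^[k] dp := by
  induction k with
  | zero => intro dp _; rfl
  | succ k ih =>
    intro dp hdp
    rw [Function.iterate_succ_apply, Function.iterate_succ_apply]
    rw [matVec_matT nn v dp hdp]
    exact ih _ (by rw [stepA_length]; omega)

-- L6: a fold over a replicated run is an iterate
theorem foldl_replicate_step (n v : Int) (k : Nat) :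
    ∀ dp : List Int, (List.replicate k v).foldl (fun dp v => stepA n v dp) dp
      = (fun w => stepA n v w)^[k] dp := by
  induction k with
  | zero => intro dp; rfl
  | succ k ih =>
    intro dp
    rw [List.replicate_succ, List.foldl_cons, Function.iterate_succ_apply, ih]

-- L7: run-length encoding flattens back to the original list
theorem rleAux_flat (ys : List Int) : ∀ (x : Int) (c : Nat),
    (rleAux x c ys).flatMap (fun vk => List.replicate vk.2 vk.1)
      = List.replicate c x ++ ys := by
  induction ys with
  | nil => intro x c; simp [rleAux]
  | cons y ys ih =>
    intro x c
    rw [rleAux]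
    split
    · rename_i hyx
      rw [ih x (c + 1), List.replicate_succ' (n := c)]
      simp only [beq_iff_eq] at hyx
      rw [hyx]
      simp
    · simp only [List.flatMap_cons]
      rw [ih y 1]
      simp

theorem rle_flat (l : List Int) :
    (rle l).flatMap (fun vk => List.replicate vk.2 vk.1) = l := by
  cases l with
  | nil => rfl
  | cons x xs =>
    rw [rle, rleAux_flat xs x 1]
    simp

theorem rleAux_pos (ys : List Int) : ∀ (x : Int) (c : Nat), 1 ≤ c →
    ∀ vk ∈ rleAux x c ys, 1 ≤ vk.2 := by
  induction ys with
  | nil =>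
    intro x c hc vk hvk
    simp [rleAux] at hvk
    subst hvk
    exact hc
  | cons y ys ih =>
    intro x c hc vk hvk
    rw [rleAux] at hvk
    split at hvk
    · exact ih x (c + 1) (by omega) vk hvk
    · rcases List.mem_cons.mp hvk with h1 | h2
      · subst h1; exact hc
      · exact ih y 1 le_rfl vk h2

theorem rle_pos (l : List Int) : ∀ vk ∈ rle l, 1 ≤ vk.2 := by
  cases l with
  | nil => intro vk h; simp [rle] at h
  | cons x xs => exact rleAux_pos xs x 1 le_rfl

theorem iter_stepA_length (nn : Nat) (v : Int) (k : Nat) :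
    ∀ dp : List Int, dp.length = nn + 1 →
    ((fun w => stepA (nn : Int) v w)^[k] dp).length = nn + 1 := by
  induction k with
  | zero => intro dp hdp; exact hdp
  | succ k ih =>
    intro dp hdp
    rw [Function.iterate_succ_apply]
    apply ih
    rw [stepA_length]
    omega

-- the bridge: B's fold over runs equals A's fold over the flattened columns
theorem B_fold (nn : Nat) (runs : List (Int × Nat)) (hpos : ∀ vk ∈ runs, 1 ≤ vk.2) :
    ∀ dp : List Int, dp.length = nn + 1 →
    runs.foldl (fun dp vk => matVec (matPow (matT (nn : Int) vk.1) vk.2) dp) dp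
      = (runs.flatMap (fun vk => List.replicate vk.2 vk.1)).foldl
          (fun dp v => stepA (nn : Int) v dp) dp := by
  induction runs with
  | nil => intro dp _; rfl
  | cons vk rest ih =>
    intro dp hdp
    simp only [List.foldl_cons, List.flatMap_cons]
    rw [List.foldl_append]
    have hT : (matT (nn : Int) vk.1).length = nn + 1 := by
      rw [matT_length]; omega
    rw [matPow_matVec _ _ (hpos vk (by simp)) dp (by rw [hT, hdp])]
    rw [iter_eq nn vk.1 vk.2 dp hdp]
    rw [← foldl_replicate_step]
    apply ih (fun x hx => hpos x (by simp [hx]))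
    rw [foldl_replicate_step]
    exact iter_stepA_length nn vk.1 vk.2 dp hdp

theorem foldr_min_all_ge (l : List Nat) (x : Nat) (h : ∀ y ∈ l, x ≤ y) : l.foldr min x = x := by
  induction l with
  | nil => rfl
  | cons y ys ih =>
    rw [List.foldr_cons, ih (fun z hz => h z (by simp [hz]))]
    exact Nat.min_eq_right (h y (by simp))

-- under Pre_, zip truncates at len(a[0]): minLen a = a.headI.length
theorem minLen_eq (a : List (List Int)) (h : Pre_solution a) : minLen a = a.headI.length := by
  unfold minLen
  apply foldr_min_all_ge
  intro y hy
  obtain ⟨r, hr, rfl⟩ := List.mem_map.mp hy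
  exact h.2 r hr

-- ===== VERDICT (by name: the statement is the Claim_ definition above) =====
theorem solution_spec : Claim_equal_solution := by
  intro a _ hpre
  unfold Spec_solution
  simp only [solution, solution_alt]
  have hcols : pyColsB a = pyCols a := by
    unfold pyColsB pyCols
    rw [minLen_eq a hpre]
  rw [hcols]
  rw [fold_eq_stepA (a.length : Int) (pyCols a) (List.replicate a.length 0 ++ [1])
        PySem.Dict.empty combsInv_empty]
  rw [B_fold a.length (rle (pyCols a)) (rle_pos _) _ (by simp)]
  rw [rle_flat]
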